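-- pv_equiv track=rewrite | github.com/Vergil0327/leetcode-history | 2-D Dynamic Programming/DigitDP/3704. Count No-Zero Pairs That Sum to N/solution.py | countNoZeroPairs
-- ===== SOURCE A (Python) =====
-- from functools import cache
--
-- def countNoZeroPairs(n: int) -> int:
--     digits = list(map(int, list(str(n))))
--     digits.reverse()  # dfs低位往高位處理
--
--     # X + Y = n
--     @cache
--     def dfs(pos, carry, endX, endY):
--         if pos >= len(digits):
--             return 1 if endX and endY and carry == 0 else 0
--         target = digits[pos]
--
--         res = 0
--         for dX in range(10):
--             if endX and dX != 0: continue
--             if not endX and dX == 0: continue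
--
--             newEndXs = [endX]
--             if not endX:
--                 newEndXs.append(True)
--
--             for dY in range(10):
--                 if endY and dY != 0: continue
--                 if not endY and dY == 0: continue
--
--                 total = dX+dY+carry
--                 if (total%10 != target): continue
--
--                 newEndYs = [endY]
--                 if not endY:
--                     newEndYs.append(True)
--
--                 for newEndX in newEndXs:
--                     for newEndY in newEndYs:
--                         res += dfs(pos+1, total//10, newEndX, newEndY)
--         return res
--     dfs.cache_clear()
--     return dfs(0, 0, False, False)
-- ===== SOURCE B (Python) =====
-- def countNoZeroPairs(n: int) -> int:
--     # Bottom-up digit DP: table maps (carry, endX, endY) -> count of ways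
--     # to fill the lower digit positions consistently with X + Y = n.
--     digits = [int(c) for c in reversed(str(n))]
--     table = {(0, False, False): 1}
--     for d in digits:
--         nxt = {}
--         for (carry, endX, endY), cnt in table.items():
--             xs = [0] if endX else range(1, 10)
--             ys = [0] if endY else range(1, 10)
--             for dX in xs:
--                 for dY in ys:
--                     total = dX + dY + carry
--                     if total % 10 != d:
--                         continue
--                     for nX in ([True] if endX else [endX, True]):
--                         for nY in ([True] if endY else [endY, True]):
--                             key = (total // 10, nX, nY)
--                             nxt[key] = nxt.get(key, 0) + cnt
--         table = nxt
--     return sum(cnt for (carry, endX, endY), cnt in table.items()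
--                if endX and endY and carry == 0)
-- ===== Notes on version B (the rewrite author's own statement) =====
-- stated objective: alternative
-- what changed: Replaces the memoized top-down recursion over digit positions by a bottom-up tabulation: a dict from (carry, endX, endY) to a count is propagated low-to-high over the digits and the accepting states (both digit strings ended, no pending carry) are summed at the end.
import Mathlib
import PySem

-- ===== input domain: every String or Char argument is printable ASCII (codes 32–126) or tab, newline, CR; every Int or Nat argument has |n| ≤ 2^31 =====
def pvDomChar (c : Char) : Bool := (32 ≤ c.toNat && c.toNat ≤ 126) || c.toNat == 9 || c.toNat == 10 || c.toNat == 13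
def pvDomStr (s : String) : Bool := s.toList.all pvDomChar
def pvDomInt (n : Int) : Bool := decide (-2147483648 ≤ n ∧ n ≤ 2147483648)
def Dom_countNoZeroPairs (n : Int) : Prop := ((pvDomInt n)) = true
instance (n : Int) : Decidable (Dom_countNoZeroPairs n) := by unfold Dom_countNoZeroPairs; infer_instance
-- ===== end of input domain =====

-- B replaces A's memoized top-down digit recursion by a bottom-up dict tabulation
-- over states (carry, endX, endY); equal return values are proved for non-negative n (A raises otherwise).

-- ===== PORT A =====
-- the state key of A's @cache: (pos, carry, endX, endY)
abbrev MemoA := PySem.Dict (Int × Int × Bool × Bool) Int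

-- literal port of A's cached dfs: the remaining digit suffix is passed alongside pos,
-- and the functools.cache is threaded explicitly as a dict keyed like the Python cache.
def dfsA : List Int → Int → Int → Bool → Bool → MemoA → Int × MemoA
  | [], _pos, carry, eX, eY, memo =>
    ((if eX && eY && (carry == 0) then (1 : Int) else 0), memo)
  | d :: rest, pos, carry, eX, eY, memo =>
    match memo.get? (pos, carry, eX, eY) with
    | some v => (v, memo)
    | none =>
      let r :=
        List.foldl (fun (acc : Int × MemoA) dX =>
          if eX && !(dX == 0) then acc
          else if !eX && (dX == 0) then acc
          else
            let newEndXs := if eX then [eX] else [eX, true]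
            List.foldl (fun acc dY =>
              if eY && !(dY == 0) then acc
              else if !eY && (dY == 0) then acc
              else
                let total := dX + dY + carry
                if !(PySem.Int.mod total 10 == d) then acc
                else
                  let newEndYs := if eY then [eY] else [eY, true]
                  List.foldl (fun acc nX =>
                    List.foldl (fun acc nY =>
                      let p := dfsA rest (pos + 1) (PySem.Int.floordiv total 10) nX nY acc.2
                      (acc.1 + p.1, p.2)) acc newEndYs) acc newEndXs)
              acc (PySem.List.pyRange 0 10 1))
          ((0 : Int), memo) (PySem.List.pyRange 0 10 1)
      (r.1, r.2.insert (pos, carry, eX, eY) r.1)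

def countNoZeroPairs (n : Int) : Int :=
  let digits := (((PySem.Int.toStr n).toList.map
    (fun c => (PySem.Int.ofStr? (String.ofList [c])).getD 0))).reverse
  (dfsA digits 0 0 false false PySem.Dict.empty).1

-- ===== PORT B =====
-- a DP state of B: (carry, endX, endY)
abbrev StB := Int × Bool × Bool

-- body of B's inner loop: push one table entry e forward through digit d into nxt
def procB (d : Int) (nxt : PySem.Dict StB Int) (e : StB × Int) : PySem.Dict StB Int :=
  let carry := e.1.1
  let endX := e.1.2.1
  let endY := e.1.2.2
  let cnt := e.2
  let xs := if endX then [(0 : Int)] else PySem.List.pyRange 1 10 1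
  let ys := if endY then [(0 : Int)] else PySem.List.pyRange 1 10 1
  List.foldl (fun nxt dX =>
    List.foldl (fun nxt dY =>
      let total := dX + dY + carry
      if !(PySem.Int.mod total 10 == d) then nxt
      else
        List.foldl (fun nxt nX =>
          List.foldl (fun nxt nY =>
            let key := (PySem.Int.floordiv total 10, nX, nY)
            nxt.insert key (nxt.getD key 0 + cnt))
            nxt (if endY then [true] else [endY, true]))
          nxt (if endX then [true] else [endX, true]))
      nxt ys) nxt xs

-- one tabulation step: consume digit d, pushing every table entry forward
def stepB (d : Int) (t : PySem.Dict StB Int) : PySem.Dict StB Int :=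
  t.items.foldl (procB d) PySem.Dict.empty

def countNoZeroPairs_alt (n : Int) : Int :=
  let digits := (PySem.Int.toStr n).toList.reverse.map
    (fun c => (PySem.Int.ofStr? (String.ofList [c])).getD 0)
  let table := digits.foldl (fun t d => stepB d t)
    (PySem.Dict.ofList [(((0 : Int), false, false), (1 : Int))])
  table.items.foldl
    (fun s e => if e.1.2.1 && e.1.2.2 && (e.1.1 == 0) then s + e.2 else s) 0

-- ===== PRECONDITION & SPEC =====
-- A raises ValueError on negative n (int('-') on the sign character); Pre_ keeps the non-negative inputs.
def Pre_countNoZeroPairs (n : Int) : Prop := 0 ≤ n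
instance (n : Int) : Decidable (Pre_countNoZeroPairs n) := by unfold Pre_countNoZeroPairs; infer_instance
def pvWitness_countNoZeroPairs : Int := 21

def Spec_countNoZeroPairs (n : Int) (out : Int) : Prop := out = countNoZeroPairs_alt n
instance (n : Int) (out : Int) : Decidable (Spec_countNoZeroPairs n out) := by unfold Spec_countNoZeroPairs; infer_instance

-- ===== CLAIM (what is proved, stated in full; the proofs are below) =====
def Claim_equal_countNoZeroPairs : Prop := ∀ (n : Int), Dom_countNoZeroPairs n → Pre_countNoZeroPairs n → Spec_countNoZeroPairs n (countNoZeroPairs n)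

-- ===== LEMMAS AND PROOFS =====

def dfsP : List Int → Int → Bool → Bool → Int
  | [], carry, eX, eY => if eX && eY && (carry == 0) then (1 : Int) else 0
  | d :: rest, carry, eX, eY =>
    List.foldl (fun r dX =>
      if eX && !(dX == 0) then r
      else if !eX && (dX == 0) then r
      else
        let newEndXs := if eX then [eX] else [eX, true]
        List.foldl (fun r dY =>
          if eY && !(dY == 0) then r
          else if !eY && (dY == 0) then r
          else
            let total := dX + dY + carry
            if !(PySem.Int.mod total 10 == d) then r
            else
              let newEndYs := if eY then [eY] else [eY, true]
              List.foldl (fun r nX =>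
                List.foldl (fun r nY =>
                  r + dfsP rest (PySem.Int.floordiv total 10) nX nY) r newEndYs) r newEndXs)
          r (PySem.List.pyRange 0 10 1)) 0 (PySem.List.pyRange 0 10 1)

def fEval (ds : List Int) (s : StB) : Int := dfsP ds s.1 s.2.1 s.2.2

def ValidA (digits : List Int) (m : MemoA) : Prop :=
  ∀ p c x y v, m.get? (p, c, x, y) = some v → v = dfsP (digits.drop p.toNat) c x y

def evalD (t : PySem.Dict StB Int) (f : StB → Int) : Int :=
  (t.items.map (fun e => e.2 * f e.1)).sum

def innerXY (f : StB → Int) (d c : Int) (ex ey : Bool) (dX dY : Int) : Int :=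
  if !(PySem.Int.mod (dX + dY + c) 10 == d) then 0
  else (((if ex then [ex] else [ex, true]).map (fun nX =>
         (((if ey then [ey] else [ey, true]).map (fun nY =>
            f (PySem.Int.floordiv (dX + dY + c) 10, nX, nY)))).sum)).sum)

def bodyA (f : StB → Int) (d c : Int) (ex ey : Bool) : Int :=
  (((PySem.List.pyRange 0 10 1).map (fun dX =>
    if ex && !(dX == 0) then 0
    else if !ex && (dX == 0) then 0
    else (((PySem.List.pyRange 0 10 1).map (fun dY =>
      if ey && !(dY == 0) then 0
      else if !ey && (dY == 0) then 0
      else innerXY f d c ex ey dX dY)).sum))).sum)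

def bodyB (f : StB → Int) (d c : Int) (ex ey : Bool) : Int :=
  (((if ex then [(0 : Int)] else PySem.List.pyRange 1 10 1).map (fun dX =>
    (((if ey then [(0 : Int)] else PySem.List.pyRange 1 10 1).map (fun dY =>
      innerXY f d c ex ey dX dY)).sum))).sum)

theorem foldl_eq_add_sum {α : Type} (step : Int → α → Int) (h : α → Int) :
    ∀ (l : List α), (∀ r x, x ∈ l → step r x = r + h x) →
    ∀ r0 : Int, l.foldl step r0 = r0 + (l.map h).sum := by
  intro l
  induction l with
  | nil => intro _ r0; simp
  | cons a l ih =>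
    intro hs r0
    simp only [List.foldl_cons, List.map_cons, List.sum_cons]
    rw [hs r0 a (List.mem_cons_self), ih (fun r x hx => hs r x (List.mem_cons_of_mem _ hx))]
    ring

theorem foldl_pair {α : Type} (g : Int × MemoA → α → Int × MemoA) (f : Int → α → Int)
    (P : MemoA → Prop) :
    ∀ (l : List α), (∀ rm x, x ∈ l → P (Prod.snd rm) → (g rm x).1 = f rm.1 x ∧ P (g rm x).2) →
    ∀ rm : Int × MemoA, P rm.2 → (l.foldl g rm).1 = l.foldl f rm.1 ∧ P (l.foldl g rm).2 := by
  intro l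
  induction l with
  | nil => intro _ rm hP; exact ⟨rfl, hP⟩
  | cons a l ih =>
    intro hs rm hP
    obtain ⟨h1, h2⟩ := hs rm a (List.mem_cons_self) hP
    simp only [List.foldl_cons]
    have := ih (fun rm x hx hP => hs rm x (List.mem_cons_of_mem _ hx) hP) (g rm a) h2
    rw [← h1]
    exact this

theorem foldl_evalD {α : Type} (f : StB → Int)
    (g : PySem.Dict StB Int → α → PySem.Dict StB Int) (h : α → Int) :
    ∀ (l : List α),
      (∀ t x, x ∈ l → t.keys.Nodup → (g t x).keys.Nodup ∧ evalD (g t x) f = evalD t f + h x) →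
    ∀ t, t.keys.Nodup →
      (l.foldl g t).keys.Nodup ∧ evalD (l.foldl g t) f = evalD t f + (l.map h).sum := by
  intro l
  induction l with
  | nil => intro _ t ht; exact ⟨ht, by simp⟩
  | cons a l ih =>
    intro hs t ht
    obtain ⟨h1, h2⟩ := hs t a (List.mem_cons_self) ht
    simp only [List.foldl_cons, List.map_cons, List.sum_cons]
    obtain ⟨h3, h4⟩ := ih (fun t x hx ht => hs t x (List.mem_cons_of_mem _ hx) ht) (g t a) h1
    exact ⟨h3, by rw [h4, h2]; ring⟩

theorem sum_map_replace (f : StB → Int) (k : StB) (v w : Int) :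
    ∀ (l : List (StB × Int)), (l.map Prod.fst).Nodup → (k, v) ∈ l →
    ((l.map (fun p => if p.1 == k then (k, w) else p)).map (fun e => e.2 * f e.1)).sum
      = (l.map (fun e => e.2 * f e.1)).sum - v * f k + w * f k := by
  intro l
  induction l with
  | nil => intro _ h; simp at h
  | cons a l ih =>
    intro hnd hmem
    simp only [List.map_cons, List.nodup_cons] at hnd ⊢
    rcases List.mem_cons.1 hmem with h | h
    · subst h
      simp only [List.sum_cons, beq_self_eq_true, if_pos]
      have : (l.map (fun p => if p.1 == k then (k, w) else p)) = l := by
        conv_rhs => rw [← List.map_id l]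
        apply List.map_congr_left
        intro p hp
        have hne : p.1 ≠ k := by
          intro hk
          have hm : p.1 ∈ l.map Prod.fst := List.mem_map.2 ⟨p, hp, rfl⟩
          rw [hk] at hm
          exact hnd.1 hm
        simp [hne]
      rw [this]
      ring
    · have hak : a.1 ≠ k := by
        intro hk
        exact hnd.1 (hk ▸ (List.mem_map_of_mem h))
      have : (a.1 == k) = false := by simp [hak]
      simp only [this, if_neg, Bool.false_eq_true, not_false_iff, List.sum_cons]
      rw [ih hnd.2 h]
      ring

theorem evalD_insertAdd (t : PySem.Dict StB Int) (ht : t.keys.Nodup) (k : StB) (c : Int)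
    (f : StB → Int) :
    evalD (t.insert k (t.getD k 0 + c)) f = evalD t f + c * f k := by
  by_cases hc : t.contains k = true
  · have hsome : (t.get? k).isSome := by rw [← PySem.Dict.contains_eq_isSome_get?]; exact hc
    obtain ⟨v, hv⟩ := Option.isSome_iff_exists.1 hsome
    have hmem : (k, v) ∈ t.items := PySem.Dict.mem_items_of_get?_eq_some t hv
    have hgd : t.getD k 0 = v := PySem.Dict.getD_of_mem_items t hmem ht 0
    have hnd : (t.items.map Prod.fst).Nodup := by
      simpa [PySem.Dict.keys] using ht
    unfold evalD
    rw [PySem.Dict.items_insert_of_contains t _ hc]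
    rw [sum_map_replace f k v (t.getD k 0 + c) t.items hnd hmem, hgd]
    ring
  · have hc' : t.contains k = false := by simpa using hc
    unfold evalD
    rw [PySem.Dict.items_insert_of_not_contains t _ hc']
    rw [PySem.Dict.getD_of_not_contains t 0 hc']
    simp

theorem dfsP_eq_bodyA (d : Int) (ds : List Int) (c : Int) (ex ey : Bool) :
    dfsP (d :: ds) c ex ey = bodyA (fEval ds) d c ex ey := by
  unfold dfsP bodyA
  rw [← zero_add (List.sum (List.map _ (PySem.List.pyRange 0 10 1)))]
  apply foldl_eq_add_sum
  intro r dX _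
  dsimp only
  split_ifs <;>
    first
      | (simp; done)
      | (apply foldl_eq_add_sum
         intro r' dY _
         dsimp only
         split_ifs <;>
           first
             | (simp; done)
             | (simp [innerXY, fEval, *]; done)
             | (simp [innerXY, fEval, *]; intro hc; simp_all)
             | (simp [innerXY, fEval, *]
                have hmm : (dX + dY + c) % 10 = d := by simp_all
                simp [hmm]; try ring))

theorem body_eq (f : StB → Int) (d c : Int) (ex ey : Bool) :
    bodyA f d c ex ey = bodyB f d c ex ey := by
  have h0 : PySem.List.pyRange 0 10 1 = [0,1,2,3,4,5,6,7,8,9] := rfl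
  have h1 : PySem.List.pyRange 1 10 1 = [1,2,3,4,5,6,7,8,9] := rfl
  cases ex <;> cases ey <;>
    simp [bodyA, bodyB, h0, h1]

theorem ValidA_insert (digits : List Int) (m : MemoA) (hm : ValidA digits m)
    (pos carry : Int) (eX eY : Bool) (res : Int)
    (hres : res = dfsP (digits.drop pos.toNat) carry eX eY) :
    ValidA digits (m.insert (pos, carry, eX, eY) res) := by
  intro p c x y v hv
  rw [PySem.Dict.get?_insert] at hv
  split_ifs at hv with h
  · obtain ⟨h1, h2, h3, h4⟩ := Prod.mk.injEq .. ▸ h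
    injection hv with hv
    subst hv
    cases h
    exact hres
  · exact hm p c x y v hv

theorem dfsA_correct (digits : List Int) :
    ∀ (ds : List Int) (pos : Int), 0 ≤ pos → digits.drop pos.toNat = ds →
    ∀ (carry : Int) (eX eY : Bool) (m : MemoA), ValidA digits m →
      (dfsA ds pos carry eX eY m).1 = dfsP ds carry eX eY ∧
      ValidA digits (dfsA ds pos carry eX eY m).2 := by
  intro ds
  induction ds with
  | nil => intro pos hpos hds carry eX eY m hm; exact ⟨rfl, hm⟩
  | cons d rest ih =>
    intro pos hpos hds carry eX eY m hm
    have hrest : digits.drop (pos + 1).toNat = rest := by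
      have h1 : (pos + 1).toNat = pos.toNat + 1 := by omega
      rw [h1, ← List.drop_drop, hds, List.drop_one, List.tail_cons]
    cases hget : m.get? (pos, carry, eX, eY) with
    | some v =>
      have hv := hm pos carry eX eY v hget
      rw [hds] at hv
      simp only [dfsA, hget]
      exact ⟨hv, hm⟩
    | none =>
      have hboth := foldl_pair
        (fun (acc : Int × MemoA) dX =>
          if eX && !(dX == 0) then acc
          else if !eX && (dX == 0) then acc
          else
            let newEndXs := if eX then [eX] else [eX, true]
            List.foldl (fun acc dY =>
              if eY && !(dY == 0) then acc
              else if !eY && (dY == 0) then acc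
              else
                let total := dX + dY + carry
                if !(PySem.Int.mod total 10 == d) then acc
                else
                  let newEndYs := if eY then [eY] else [eY, true]
                  List.foldl (fun acc nX =>
                    List.foldl (fun acc nY =>
                      let p := dfsA rest (pos + 1) (PySem.Int.floordiv total 10) nX nY acc.2
                      (acc.1 + p.1, p.2)) acc newEndYs) acc newEndXs)
              acc (PySem.List.pyRange 0 10 1))
        (fun r dX =>
          if eX && !(dX == 0) then r
          else if !eX && (dX == 0) then r
          else
            let newEndXs := if eX then [eX] else [eX, true]
            List.foldl (fun r dY =>
              if eY && !(dY == 0) then r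
              else if !eY && (dY == 0) then r
              else
                let total := dX + dY + carry
                if !(PySem.Int.mod total 10 == d) then r
                else
                  let newEndYs := if eY then [eY] else [eY, true]
                  List.foldl (fun r nX =>
                    List.foldl (fun r nY =>
                      r + dfsP rest (PySem.Int.floordiv total 10) nX nY) r newEndYs) r newEndXs)
              r (PySem.List.pyRange 0 10 1))
        (ValidA digits) (PySem.List.pyRange 0 10 1)
        (by
          intro rm dX _ hP
          dsimp only
          split_ifs <;> try exact ⟨rfl, hP⟩
          all_goals
            apply foldl_pair _ _ (ValidA digits) _ ?_ rm hP
          all_goals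
            intro rm' dY _ hP'
            dsimp only
            split_ifs <;> try exact ⟨rfl, hP'⟩
          all_goals
            apply foldl_pair _ _ (ValidA digits) _ ?_ rm' hP'
          all_goals
            intro rm2 nX _ hP2
            apply foldl_pair _ _ (ValidA digits) _ ?_ rm2 hP2
          all_goals
            intro rm3 nY _ hP3
            dsimp only
            obtain ⟨e1, e2⟩ := ih (pos + 1) (by omega) hrest
              (PySem.Int.floordiv (dX + dY + carry) 10) nX nY rm3.2 hP3
            exact ⟨by rw [e1], e2⟩)
        ((0 : Int), m) hm
      simp only [dfsA, hget]
      refine ⟨?_, ?_⟩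
      · rw [hboth.1]
        rfl
      · apply ValidA_insert digits _ hboth.2
        rw [hds, hboth.1]
        rfl

theorem procB_step (ds : List Int) (d : Int) (e : StB × Int)
    (nxt : PySem.Dict StB Int) (hn : nxt.keys.Nodup) :
    (procB d nxt e).keys.Nodup ∧
    evalD (procB d nxt e) (fEval ds)
      = evalD nxt (fEval ds) + e.2 * bodyB (fEval ds) d e.1.1 e.1.2.1 e.1.2.2 := by
  obtain ⟨⟨c, ex, ey⟩, cnt⟩ := e
  unfold procB
  dsimp only
  have hmain := foldl_evalD (fEval ds)
    (fun nxt dX =>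
      List.foldl (fun nxt dY =>
        let total := dX + dY + c
        if !(PySem.Int.mod total 10 == d) then nxt
        else
          List.foldl (fun nxt nX =>
            List.foldl (fun nxt nY =>
              let key := (PySem.Int.floordiv total 10, nX, nY)
              nxt.insert key (nxt.getD key 0 + cnt))
              nxt (if ey then [true] else [ey, true]))
            nxt (if ex then [true] else [ex, true]))
        nxt (if ey then [(0 : Int)] else PySem.List.pyRange 1 10 1))
    (fun dX =>
      (((if ey then [(0 : Int)] else PySem.List.pyRange 1 10 1).map (fun dY =>
        if !(PySem.Int.mod (dX + dY + c) 10 == d) then 0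
        else (((if ex then [true] else [ex, true]).map (fun nX =>
          (((if ey then [true] else [ey, true]).map (fun nY =>
            cnt * fEval ds (PySem.Int.floordiv (dX + dY + c) 10, nX, nY))).sum))).sum))).sum))
    (if ex then [(0 : Int)] else PySem.List.pyRange 1 10 1)
    (by
      intro t dX _ ht
      dsimp only
      apply foldl_evalD _ _ _ _ ?_ t ht
      intro t' dY _ ht'
      dsimp only
      split_ifs <;> try exact ⟨ht', by simp⟩
      all_goals apply foldl_evalD _ _ _ _ ?_ t' ht'
      all_goals intro t2 nX _ ht2
      all_goals apply foldl_evalD _ _ _ _ ?_ t2 ht2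
      all_goals intro t3 nY _ ht3
      all_goals
        exact ⟨PySem.Dict.nodup_keys_insert _ _ _ ht3,
          evalD_insertAdd t3 ht3 _ cnt (fEval ds)⟩)
    nxt hn
  refine ⟨hmain.1, ?_⟩
  rw [hmain.2]
  congr 1
  cases ex <;> cases ey <;>
    simp [bodyB, innerXY, ← List.sum_map_mul_left, mul_ite, mul_zero, mul_add]

theorem stepB_exchange (ds : List Int) (d : Int) (t : PySem.Dict StB Int) (_ht : t.keys.Nodup) :
    (stepB d t).keys.Nodup ∧ evalD (stepB d t) (fEval ds) = evalD t (fEval (d :: ds)) := by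
  unfold stepB
  have h := foldl_evalD (fEval ds) (procB d)
    (fun e => e.2 * bodyB (fEval ds) d e.1.1 e.1.2.1 e.1.2.2) t.items
    (fun nxt e _ hnd => procB_step ds d e nxt hnd) PySem.Dict.empty (by decide)
  refine ⟨h.1, ?_⟩
  rw [h.2]
  have hmap : ∀ e ∈ t.items, e.2 * bodyB (fEval ds) d e.1.1 e.1.2.1 e.1.2.2
      = e.2 * fEval (d :: ds) e.1 := by
    intro e _
    rw [← body_eq, ← dfsP_eq_bodyA]
    rfl
  rw [List.map_congr_left hmap]
  show evalD PySem.Dict.empty (fEval ds) + _ = _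
  rw [show evalD PySem.Dict.empty (fEval ds) = 0 from rfl, zero_add]
  rfl

theorem final_sum (l : List (StB × Int)) :
    l.foldl (fun s e => if e.1.2.1 && e.1.2.2 && (e.1.1 == 0) then s + e.2 else s) 0
      = (l.map (fun e => e.2 * fEval [] e.1)).sum := by
  rw [foldl_eq_add_sum _ (fun e => e.2 * fEval [] e.1) l ?_ 0, zero_add]
  intro r e _
  by_cases hc : (e.1.2.1 && e.1.2.2 && (e.1.1 == 0)) = true <;>
    simp [fEval, dfsP, hc]

theorem tab_correct (digits : List Int) :
    ∀ (t : PySem.Dict StB Int), t.keys.Nodup →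
      (digits.foldl (fun t d => stepB d t) t).keys.Nodup ∧
      evalD (digits.foldl (fun t d => stepB d t) t) (fEval []) = evalD t (fEval digits) := by
  induction digits with
  | nil => intro t ht; exact ⟨ht, rfl⟩
  | cons d ds ih =>
    intro t ht
    obtain ⟨h1, h2⟩ := stepB_exchange ds d t ht
    obtain ⟨h3, h4⟩ := ih (stepB d t) h1
    simp only [List.foldl_cons]
    exact ⟨h3, by rw [h4, h2]⟩

-- ===== VERDICT (by name: the statement is the Claim_ definition above) =====
theorem countNoZeroPairs_spec : Claim_equal_countNoZeroPairs := by
  intro n _ _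
  unfold Spec_countNoZeroPairs countNoZeroPairs countNoZeroPairs_alt
  dsimp only
  rw [List.map_reverse]
  set digits := (((PySem.Int.toStr n).toList.map
    (fun c => (PySem.Int.ofStr? (String.ofList [c])).getD 0))).reverse with hdig
  have hA := dfsA_correct digits digits 0 le_rfl (by simp) 0 false false PySem.Dict.empty
    (by intro p c x y v hv; simp [PySem.Dict.get?_empty] at hv)
  rw [hA.1]
  have hT := tab_correct digits (PySem.Dict.ofList [(((0 : Int), false, false), (1 : Int))])
    (by decide)
  rw [final_sum]
  have heval : (List.map (fun e => e.2 * fEval [] e.1)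
      ((digits.foldl (fun t d => stepB d t)
        (PySem.Dict.ofList [(((0 : Int), false, false), (1 : Int))])).items)).sum
      = evalD (digits.foldl (fun t d => stepB d t)
        (PySem.Dict.ofList [(((0 : Int), false, false), (1 : Int))])) (fEval []) := rfl
  rw [heval, hT.2]
  have hit : (PySem.Dict.ofList [(((0 : Int), false, false), (1 : Int))]).items
      = [(((0 : Int), false, false), (1 : Int))] := rfl
  simp [evalD, hit, fEval]
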